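-- pv_equiv track=rewrite | github.com/therealharish/portfolio | Python Problems/Day28 Ques2.py | minimumIndexedCharacterWithDict
-- ===== SOURCE A (Python) =====
-- def minimumIndexedCharacterWithDict(s1, s2):
--     d = {}
--     minIndex = float('inf')
--     for index, i in enumerate(s1):
--         if i not in d:
--             d[i] = index
--     for i in s2:
--         if i in d:
--             minIndex = min(minIndex, d[i])
--     return -1 if minIndex == float('inf') else minIndex
-- ===== SOURCE B (Python) =====
-- def minimumIndexedCharacterWithDict(s1, s2):
--     chars2 = set(s2)
--     for index, ch in enumerate(s1):
--         if ch in chars2: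
--             return index
--     return -1
-- ===== Notes on version B (the rewrite author's own statement) =====
-- stated objective: faster
-- what changed: Instead of building a first-occurrence-index dict over s1 and then taking the min over a full scan of s2, B builds a set of s2's characters and scans s1 once, returning the first index whose character is in the set (early exit, no min tracking).
import Mathlib
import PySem

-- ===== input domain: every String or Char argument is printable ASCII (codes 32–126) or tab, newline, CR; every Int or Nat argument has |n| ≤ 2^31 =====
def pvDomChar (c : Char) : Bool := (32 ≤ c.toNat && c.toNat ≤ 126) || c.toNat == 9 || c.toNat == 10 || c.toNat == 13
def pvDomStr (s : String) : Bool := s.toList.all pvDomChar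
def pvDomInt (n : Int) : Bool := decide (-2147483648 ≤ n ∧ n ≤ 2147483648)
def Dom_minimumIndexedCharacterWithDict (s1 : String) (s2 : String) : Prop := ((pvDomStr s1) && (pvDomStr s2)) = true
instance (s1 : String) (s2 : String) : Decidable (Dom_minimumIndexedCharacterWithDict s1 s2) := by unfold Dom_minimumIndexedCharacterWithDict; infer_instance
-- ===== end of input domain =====

-- B replaces A's first-occurrence dict over s1 + full min-scan of s2 by a set of s2's
-- characters and a single early-exit scan of s1; same result, proved equal below.


-- ===== PORT A =====
-- d = {}; for index, i in enumerate(s1): if i not in d: d[i] = index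
-- minIndex = inf; for i in s2: if i in d: minIndex = min(minIndex, d[i])
-- minIndex is modelled as Option Int (none = float('inf')); min(inf, v) = v.
def minimumIndexedCharacterWithDict (s1 : String) (s2 : String) : Int :=
  let d : PySem.Dict Char Int :=
    (PySem.List.enumerate s1.toList 0).foldl
      (fun d p => if d.contains p.2 then d else d.insert p.2 p.1) PySem.Dict.empty
  let minIndex : Option Int :=
    s2.toList.foldl
      (fun acc c =>
        if d.contains c then
          some (match acc with
                | none => d.getD c 0      -- d[c]; the guard ensures c is present
                | some m => min m (d.getD c 0))
        else acc) none
  match minIndex with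
  | none => -1
  | some m => m

-- ===== PORT B =====
-- for index, ch in enumerate(s1): if ch in chars2: return index  /  return -1
def pvAltGo (chars2 : PySem.Set Char) : List Char → Int → Int
  | [], _ => -1
  | c :: rest, k => if PySem.Set.contains chars2 c then k else pvAltGo chars2 rest (k + 1)

def minimumIndexedCharacterWithDict_alt (s1 : String) (s2 : String) : Int :=
  let chars2 := PySem.Set.ofList s2.toList
  pvAltGo chars2 s1.toList 0

-- ===== PRECONDITION & SPEC =====
def Spec_minimumIndexedCharacterWithDict (s1 : String) (s2 : String) (out : Int) : Prop := out = minimumIndexedCharacterWithDict_alt s1 s2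
instance (s1 : String) (s2 : String) (out : Int) : Decidable (Spec_minimumIndexedCharacterWithDict s1 s2 out) := by unfold Spec_minimumIndexedCharacterWithDict; infer_instance

-- ===== CLAIM (what is proved, stated in full; the proofs are below) =====
def Claim_equal_minimumIndexedCharacterWithDict : Prop := ∀ (s1 : String) (s2 : String), Dom_minimumIndexedCharacterWithDict s1 s2 → Spec_minimumIndexedCharacterWithDict s1 s2 (minimumIndexedCharacterWithDict s1 s2)

-- ===== LEMMAS AND PROOFS =====

-- optional-minimum over Nat (none = +inf)
def pvOmin : Option Nat → Nat → Option Nat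
  | none, v => some v
  | some m, v => some (min m v)

-- one step of A's second loop, abstracted to Nat indices
def pvStep (l1 : List Char) (acc : Option Nat) (c : Char) : Option Nat :=
  match PySem.List.index? l1 c with
  | some n => pvOmin acc n
  | none => acc

def pvNatM (l1 l2 : List Char) (acc : Option Nat) : Option Nat := l2.foldl (pvStep l1) acc

-- A's dict is the first-occurrence index table of s1
theorem pv_dict_get (l : List Char) (k : Int) (d : PySem.Dict Char Int) (c : Char) :
    ((PySem.List.enumerate l k).foldl
      (fun d p => if d.contains p.2 then d else d.insert p.2 p.1) d).get? c
    = if d.contains c then d.get? c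
      else (PySem.List.index? l c).map (fun n => k + n) := by
  induction l generalizing k d with
  | nil =>
      simp only [PySem.List.enumerate_nil, List.foldl_nil]
      by_cases h : d.contains c
      · simp [h]
      · simp only [h, Bool.false_eq_true, if_false, PySem.List.index?_eq_idxOf?,
          List.idxOf?_nil]
        simpa using (PySem.Dict.get?_eq_none_iff_contains d c).mpr (by simpa using h)
  | cons a t ih =>
      rw [PySem.List.enumerate_cons]
      simp only [List.foldl_cons]
      by_cases hda : d.contains a
      · simp only [hda, if_true]
        rw [ih (k + 1) d]
        by_cases hdc : d.contains c
        · simp [hdc]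
        · have hca : a ≠ c := by
            intro e; rw [e] at hda; rw [hda] at hdc; exact hdc rfl
          rw [PySem.List.index?_cons_of_ne _ hca]
          simp only [hdc, Bool.false_eq_true, if_false]
          cases PySem.List.index? t c with
          | none => rfl
          | some n => simp; ring
      · simp only [hda, Bool.false_eq_true, if_false]
        rw [ih (k + 1) (d.insert a k)]
        by_cases hca : c = a
        · subst hca
          rw [PySem.Dict.contains_insert_self]
          simp only [if_true, PySem.Dict.get?_insert_self]
          simp only [hda, Bool.false_eq_true, if_false, PySem.List.index?_cons_self]
          simp
        · rw [PySem.Dict.contains_insert]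
          have hb : (c == a) = false := by simpa using hca
          rw [hb, Bool.false_or, PySem.Dict.get?_insert_of_ne _ _ hca]
          by_cases hdc : d.contains c
          · simp [hdc]
          · have hac : a ≠ c := fun e => hca e.symm
            rw [PySem.List.index?_cons_of_ne _ hac]
            simp only [hdc, Bool.false_eq_true, if_false]
            cases PySem.List.index? t c with
            | none => rfl
            | some n => simp; ring

theorem pv_natm_nil (l2 : List Char) (acc : Option Nat) : pvNatM [] l2 acc = acc := by
  induction l2 generalizing acc with
  | nil => rfl
  | cons c t ih =>
      simp only [pvNatM, List.foldl_cons] at *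
      rw [show pvStep [] acc c = acc by simp [pvStep]]
      exact ih acc

theorem pv_natm_zero (l1 l2 : List Char) : l2.foldl (pvStep l1) (some 0) = some 0 := by
  induction l2 with
  | nil => rfl
  | cons c t ih =>
      simp only [List.foldl_cons]
      rw [show pvStep l1 (some 0) c = some 0 by
        unfold pvStep; cases PySem.List.index? l1 c <;> simp [pvOmin]]
      exact ih

theorem pv_natm_shift (a : Char) (l1 l2 : List Char) (acc : Option Nat)
    (h : ∀ c ∈ l2, c ≠ a) :
    l2.foldl (pvStep (a :: l1)) (acc.map (· + 1)) = (l2.foldl (pvStep l1) acc).map (· + 1) := by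
  induction l2 generalizing acc with
  | nil => rfl
  | cons c t ih =>
      simp only [List.foldl_cons]
      have hca : a ≠ c := fun e => h c (List.mem_cons_self) e.symm
      have hstep : pvStep (a :: l1) (acc.map (· + 1)) c = (pvStep l1 acc c).map (· + 1) := by
        unfold pvStep
        rw [PySem.List.index?_cons_of_ne _ hca]
        cases PySem.List.index? l1 c with
        | none => rfl
        | some n =>
            cases acc with
            | none => rfl
            | some m => simp [pvOmin]
      rw [hstep]
      exact ih _ (fun c hc => h c (List.mem_cons_of_mem _ hc))

theorem pv_natm_hit (a : Char) (l1 l2 : List Char) (h : a ∈ l2) :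
    l2.foldl (pvStep (a :: l1)) none = some 0 := by
  obtain ⟨u, v, rfl⟩ := List.append_of_mem h
  rw [List.foldl_append, List.foldl_cons]
  have hz : ∀ acc0 : Option Nat, pvStep (a :: l1) acc0 a = some 0 := by
    intro acc0
    unfold pvStep
    rw [PySem.List.index?_cons_self]
    cases acc0 <;> simp [pvOmin]
  rw [hz]
  exact pv_natm_zero _ _

theorem pv_natm_findIdx (l1 l2 : List Char) :
    pvNatM l1 l2 none = List.findIdx? (fun c => decide (c ∈ l2)) l1 := by
  induction l1 with
  | nil => simp [pv_natm_nil]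
  | cons a t ih =>
      by_cases ha : a ∈ l2
      · simp only [pvNatM] at *
        rw [pv_natm_hit a t l2 ha, List.findIdx?_cons]
        simp [ha]
      · simp only [pvNatM] at *
        have := pv_natm_shift a t l2 none (fun c hc e => ha (e ▸ hc))
        simp only [Option.map_none] at this
        rw [this, ih, List.findIdx?_cons]
        simp [ha]

-- A's Int-valued second loop is the Nat fold, cast
theorem pv_intm (l1 l2 : List Char) (d : PySem.Dict Char Int)
    (hd : ∀ c, d.get? c = (PySem.List.index? l1 c).map (fun n => (n : Int)))
    (accN : Option Nat) :
    l2.foldl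
      (fun acc c =>
        if d.contains c then
          some (match acc with
                | none => d.getD c 0
                | some m => min m (d.getD c 0))
        else acc) (accN.map (fun n => (n : Int)))
    = (pvNatM l1 l2 accN).map (fun n => (n : Int)) := by
  induction l2 generalizing accN with
  | nil => rfl
  | cons c t ih =>
      simp only [pvNatM, List.foldl_cons] at *
      have hstep :
          (if d.contains c = true then
            some (match accN.map (fun n => (n : Int)) with
                  | none => d.getD c 0
                  | some m => min m (d.getD c 0))
          else accN.map (fun n => (n : Int)))
          = (pvStep l1 accN c).map (fun n => (n : Int)) := by
        cases h : PySem.List.index? l1 c with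
        | none =>
            have hcont : d.contains c = false := by
              rw [PySem.Dict.contains_eq_isSome_get?, hd c, h]; rfl
            unfold pvStep; rw [h]; simp [hcont]
        | some n =>
            have hget : d.get? c = some (n : Int) := by rw [hd c, h]; rfl
            have hcont : d.contains c = true := by
              rw [PySem.Dict.contains_eq_isSome_get?, hget]; rfl
            have hgetD : d.getD c 0 = (n : Int) := PySem.Dict.getD_of_get?_eq_some d 0 hget
            unfold pvStep; rw [h]
            cases accN with
            | none => simp [hcont, hgetD, pvOmin]
            | some m => simp [hcont, hgetD, pvOmin, Nat.cast_min]
      rw [hstep]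
      exact ih _

-- B's loop returns k + first hit index
theorem pv_altGo (S : PySem.Set Char) (l : List Char) (k : Int) :
    pvAltGo S l k
    = match List.findIdx? (fun c => decide (c ∈ S)) l with
      | none => -1
      | some i => k + i := by
  induction l generalizing k with
  | nil => rfl
  | cons c rest ih =>
      unfold pvAltGo
      rw [List.findIdx?_cons]
      by_cases hp : c ∈ S
      · simp [hp]
      · simp only [hp, decide_false, Bool.false_eq_true, if_false]
        rw [show PySem.Set.contains S c = false by simpa using hp]
        simp only [Bool.false_eq_true, if_false]
        rw [ih (k + 1)]
        cases List.findIdx? (fun c => decide (c ∈ S)) rest with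
        | none => rfl
        | some i => simp; ring

-- ===== VERDICT (by name: the statement is the Claim_ definition above) =====
theorem minimumIndexedCharacterWithDict_spec : Claim_equal_minimumIndexedCharacterWithDict := by
  intro s1 s2 _
  unfold Spec_minimumIndexedCharacterWithDict
  unfold minimumIndexedCharacterWithDict minimumIndexedCharacterWithDict_alt
  rw [pv_altGo]
  have hd : ∀ c, ((PySem.List.enumerate s1.toList 0).foldl
      (fun d p => if d.contains p.2 then d else d.insert p.2 p.1)
      PySem.Dict.empty).get? c
      = (PySem.List.index? s1.toList c).map (fun n => (n : Int)) := by
    intro c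
    rw [pv_dict_get]
    simp [PySem.Dict.contains_empty]
  simp only []
  rw [show (none : Option Int) = (none : Option Nat).map (fun n => (n : Int)) from rfl]
  rw [pv_intm s1.toList s2.toList _ hd none]
  rw [pv_natm_findIdx]
  have hpred : (fun c => decide (c ∈ PySem.Set.ofList s2.toList))
      = (fun c => decide (c ∈ s2.toList)) := by
    funext c
    simp [PySem.Set.mem_ofList]
  rw [hpred]
  cases List.findIdx? (fun c => decide (c ∈ s2.toList)) s1.toList with
  | none => rfl
  | some n => simp
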